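-- pv_equiv track=rewrite | github.com/Strudel-marketing/schema-api | app.py | categorize_entity
-- ===== SOURCE A (Python) =====
-- def categorize_entity(types):
--     """Categorize entity based on its types"""
--     types_lower = [t.lower() for t in types]
--
--     if any('organization' in t or 'business' in t for t in types_lower):
--         return 'organization'
--     if any('website' in t for t in types_lower):
--         return 'website'
--     if any('webpage' in t for t in types_lower):
--         return 'webpage'
--     if any('article' in t or 'posting' in t or 'news' in t for t in types_lower):
--         return 'article'
--     if any('product' in t for t in types_lower):
--         return 'product'
--     if any('person' in t for t in types_lower):
--         return 'person'
--     if any('image' in t for t in types_lower):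
--         return 'image'
--     if any('video' in t for t in types_lower):
--         return 'video'
--     if any('event' in t for t in types_lower):
--         return 'event'
--     if any('faq' in t for t in types_lower):
--         return 'faq'
--     if any('howto' in t for t in types_lower):
--         return 'howto'
--     if any('breadcrumb' in t for t in types_lower):
--         return 'breadcrumb'
--     if any('review' in t or 'rating' in t for t in types_lower):
--         return 'review'
--
--     return 'other'
-- ===== SOURCE B (Python) =====
-- RULES = [
--     ("organization", ["organization", "business"]),
--     ("website", ["website"]),
--     ("webpage", ["webpage"]),
--     ("article", ["article", "posting", "news"]),
--     ("product", ["product"]),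
--     ("person", ["person"]),
--     ("image", ["image"]),
--     ("video", ["video"]),
--     ("event", ["event"]),
--     ("faq", ["faq"]),
--     ("howto", ["howto"]),
--     ("breadcrumb", ["breadcrumb"]),
--     ("review", ["review", "rating"]),
-- ]
--
--
-- def _rank(tl):
--     """Priority rank of the first rule matched by this lowercased type, len(RULES) if none."""
--     return next((i for i, (_, kws) in enumerate(RULES) if any(k in tl for k in kws)),
--                 len(RULES))
--
--
-- def categorize_entity(types):
--     """Categorize entity based on its types"""
--     best = len(RULES)
--     for t in types:
--         best = min(best, _rank(t.lower()))
--     return RULES[best][0] if best < len(RULES) else 'other'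
-- ===== Notes on version B (the rewrite author's own statement) =====
-- stated objective: alternative
-- what changed: Replaces the 13 sequential any()-scans over the whole type list by a rule table and a single pass over the types that keeps a running minimum priority rank, returning the category at the best rank.
import Mathlib
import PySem

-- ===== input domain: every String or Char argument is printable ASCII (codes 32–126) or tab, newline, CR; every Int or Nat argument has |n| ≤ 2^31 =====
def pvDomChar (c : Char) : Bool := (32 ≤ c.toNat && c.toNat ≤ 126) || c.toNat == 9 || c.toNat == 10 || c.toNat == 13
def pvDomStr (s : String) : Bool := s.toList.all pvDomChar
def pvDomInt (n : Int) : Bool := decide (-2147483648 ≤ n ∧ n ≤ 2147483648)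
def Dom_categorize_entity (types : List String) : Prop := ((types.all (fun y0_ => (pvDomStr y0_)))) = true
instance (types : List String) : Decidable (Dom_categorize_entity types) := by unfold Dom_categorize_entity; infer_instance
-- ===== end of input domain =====

-- B replaces A's 13 sequential whole-list scans by a rule table and a single pass keeping a running minimum priority rank (alternative decomposition, same cost).

-- ===== PORT A =====
def categorize_entity (types : List String) : String :=
  let types_lower := types.map (fun t => PySem.Str.lower t)
  if types_lower.any (fun t => PySem.Str.isIn "organization" t || PySem.Str.isIn "business" t) then "organization"
  else if types_lower.any (fun t => PySem.Str.isIn "website" t) then "website"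
  else if types_lower.any (fun t => PySem.Str.isIn "webpage" t) then "webpage"
  else if types_lower.any (fun t => PySem.Str.isIn "article" t || PySem.Str.isIn "posting" t || PySem.Str.isIn "news" t) then "article"
  else if types_lower.any (fun t => PySem.Str.isIn "product" t) then "product"
  else if types_lower.any (fun t => PySem.Str.isIn "person" t) then "person"
  else if types_lower.any (fun t => PySem.Str.isIn "image" t) then "image"
  else if types_lower.any (fun t => PySem.Str.isIn "video" t) then "video"
  else if types_lower.any (fun t => PySem.Str.isIn "event" t) then "event"
  else if types_lower.any (fun t => PySem.Str.isIn "faq" t) then "faq"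
  else if types_lower.any (fun t => PySem.Str.isIn "howto" t) then "howto"
  else if types_lower.any (fun t => PySem.Str.isIn "breadcrumb" t) then "breadcrumb"
  else if types_lower.any (fun t => PySem.Str.isIn "review" t || PySem.Str.isIn "rating" t) then "review"
  else "other"

-- ===== PORT B =====
def pvRules : List (String × List String) :=
  [("organization", ["organization", "business"]),
   ("website", ["website"]),
   ("webpage", ["webpage"]),
   ("article", ["article", "posting", "news"]),
   ("product", ["product"]),
   ("person", ["person"]),
   ("image", ["image"]),
   ("video", ["video"]),
   ("event", ["event"]),
   ("faq", ["faq"]),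
   ("howto", ["howto"]),
   ("breadcrumb", ["breadcrumb"]),
   ("review", ["review", "rating"])]

-- _rank: first rule index whose keyword list matches, length of the table if none
def pvRank (tl : String) : Nat :=
  pvRules.findIdx (fun r => r.2.any (fun k => PySem.Str.isIn k tl))

def categorize_entity_alt (types : List String) : String :=
  let best := types.foldl (fun b t => min b (pvRank (PySem.Str.lower t))) pvRules.length
  if best < pvRules.length then (pvRules.getD best ("", [])).1 else "other"

-- ===== PRECONDITION & SPEC =====
def Spec_categorize_entity (types : List String) (out : String) : Prop := out = categorize_entity_alt types
instance (types : List String) (out : String) : Decidable (Spec_categorize_entity types out) := by unfold Spec_categorize_entity; infer_instance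

-- ===== CLAIM (what is proved, stated in full; the proofs are below) =====
def Claim_equal_categorize_entity : Prop := ∀ (types : List String), Dom_categorize_entity types → Spec_categorize_entity types (categorize_entity types)

-- ===== LEMMAS AND PROOFS =====

-- running minimum of zeros stays zero
theorem foldl_min_zero {β : Type} (ts : List β) :
    ts.foldl (fun acc (_ : β) => min acc 0) 0 = 0 := by
  induction ts with
  | nil => rfl
  | cons t ts ih => simpa using ih

-- if some element scores 0, the running minimum ends at 0
theorem foldl_min_of_exists_zero {β : Type} (g : β → Nat) (ts : List β) :
    ∀ (b : Nat), (∃ t ∈ ts, g t = 0) → ts.foldl (fun acc t => min acc (g t)) b = 0 := by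
  induction ts with
  | nil => intro b h; rcases h with ⟨t, ht, _⟩; cases ht
  | cons t ts ih =>
    intro b h
    rcases h with ⟨u, hu, hgu⟩
    rcases List.mem_cons.1 hu with rfl | hu'
    · simp only [List.foldl_cons, hgu, Nat.min_zero]
      clear ih hu hgu
      induction ts with
      | nil => rfl
      | cons v vs ih2 => simpa using ih2
    · exact ih _ ⟨u, hu', hgu⟩

-- shifting every score and the seed by one shifts the running minimum by one
theorem foldl_min_succ {β : Type} (g : β → Nat) (ts : List β) :
    ∀ (b : Nat), ts.foldl (fun acc t => min acc (g t + 1)) (b + 1)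
      = ts.foldl (fun acc t => min acc (g t)) b + 1 := by
  induction ts with
  | nil => intro b; rfl
  | cons t ts ih =>
    intro b
    simp only [List.foldl_cons]
    have hm : min (b + 1) (g t + 1) = min b (g t) + 1 := by omega
    rw [hm, ih]

-- the running minimum of first-match indices is the first index matched by any element
theorem foldl_min_findIdx {α β : Type} (p : β → α → Bool) (ts : List β) :
    ∀ (l : List α), ts.foldl (fun acc t => min acc (l.findIdx (p t))) l.length
      = l.findIdx (fun a => ts.any (fun t => p t a)) := by
  intro l
  induction l with
  | nil =>
    simp only [List.findIdx_nil, List.length_nil]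
    exact foldl_min_zero ts
  | cons a l ih =>
    by_cases h : ts.any (fun t => p t a)
    · rw [List.findIdx_cons]
      simp only [h, cond_true]
      rcases List.any_eq_true.1 h with ⟨u, hu, hpu⟩
      exact foldl_min_of_exists_zero (fun t => (a :: l).findIdx (p t)) ts _
        ⟨u, hu, by simp [List.findIdx_cons, hpu]⟩
    · have hall : ∀ t ∈ ts, p t a = false := by
        intro t ht
        by_contra hc
        exact h (List.any_eq_true.2 ⟨t, ht, by simpa using hc⟩)
      rw [List.findIdx_cons]
      simp only [h, cond_false]
      have hstep : (a :: l).length = l.length + 1 := rfl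
      rw [hstep]
      rw [PySem.List.foldl_congr_mem ts
          (fun acc t => min acc ((a :: l).findIdx (p t)))
          (fun acc t => min acc (l.findIdx (p t) + 1)) (l.length + 1)
          (by intro acc t ht; simp only [List.findIdx_cons, hall t ht, cond_false])]
      rw [foldl_min_succ, ih]

-- specialization of foldl_min_findIdx to B's fold over the rule table
theorem best_eq (types : List String) :
    types.foldl (fun b t => min b (List.findIdx
        (fun r : String × List String => r.2.any fun k => PySem.Str.isIn k (PySem.Str.lower t)) pvRules))
      pvRules.length
    = pvRules.findIdx (fun r => types.any fun t => r.2.any fun k => PySem.Str.isIn k (PySem.Str.lower t)) :=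
  foldl_min_findIdx (fun t r => r.2.any fun k => PySem.Str.isIn k (PySem.Str.lower t)) types pvRules

-- ===== VERDICT (by name: the statement is the Claim_ definition above) =====
set_option maxHeartbeats 1000000 in
theorem categorize_entity_spec : Claim_equal_categorize_entity := by
  intro types _
  unfold Spec_categorize_entity
  show categorize_entity types = categorize_entity_alt types
  unfold categorize_entity_alt
  simp only [pvRank]
  rw [best_eq]
  unfold categorize_entity
  simp only [pvRules, List.findIdx_cons, List.findIdx_nil, List.any_cons, List.any_nil,
    Bool.or_false, Bool.cond_eq_ite, List.any_map, Function.comp_def, Bool.or_assoc]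
  generalize (types.any fun x => PySem.Str.isIn "organization" (PySem.Str.lower x) || PySem.Str.isIn "business" (PySem.Str.lower x)) = b0
  generalize (types.any fun x => PySem.Str.isIn "website" (PySem.Str.lower x)) = b1
  generalize (types.any fun x => PySem.Str.isIn "webpage" (PySem.Str.lower x)) = b2
  generalize (types.any fun x => PySem.Str.isIn "article" (PySem.Str.lower x) || (PySem.Str.isIn "posting" (PySem.Str.lower x) || PySem.Str.isIn "news" (PySem.Str.lower x))) = b3
  generalize (types.any fun x => PySem.Str.isIn "product" (PySem.Str.lower x)) = b4
  generalize (types.any fun x => PySem.Str.isIn "person" (PySem.Str.lower x)) = b5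
  generalize (types.any fun x => PySem.Str.isIn "image" (PySem.Str.lower x)) = b6
  generalize (types.any fun x => PySem.Str.isIn "video" (PySem.Str.lower x)) = b7
  generalize (types.any fun x => PySem.Str.isIn "event" (PySem.Str.lower x)) = b8
  generalize (types.any fun x => PySem.Str.isIn "faq" (PySem.Str.lower x)) = b9
  generalize (types.any fun x => PySem.Str.isIn "howto" (PySem.Str.lower x)) = b10
  generalize (types.any fun x => PySem.Str.isIn "breadcrumb" (PySem.Str.lower x)) = b11
  generalize (types.any fun x => PySem.Str.isIn "review" (PySem.Str.lower x) || PySem.Str.isIn "rating" (PySem.Str.lower x)) = b12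
  revert b0 b1 b2 b3 b4 b5 b6 b7 b8 b9 b10 b11 b12
  decide
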